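-- pv_equiv track=rewrite | github.com/terror/solutions | binarysearch/social-distancing.py | solve
-- ===== SOURCE A (Python) =====
-- def solve(s, k):
--   previous = -k
--   for i in range(len(s)):
--     if s[i] == 'x': previous = i
--     elif s[i] == '.':
--       r = s.find('x', i, len(s))
--       if i - previous >= k and (r == -1 or r - i >= k):
--         return True
--   return False
-- ===== SOURCE B (Python) =====
-- def solve(s, k):
--     n = len(s)
--     nxt = [0] * n
--     nx = -1
--     for i in range(n - 1, -1, -1):
--         if s[i] == 'x':
--             nx = i
--         nxt[i] = nx
--     prev = -k
--     for i in range(n):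
--         c = s[i]
--         if c == 'x':
--             prev = i
--         elif c == '.':
--             r = nxt[i]
--             if i - prev >= k and (r == -1 or r - i >= k):
--                 return True
--     return False
-- ===== Notes on version B (the rewrite author's own statement) =====
-- stated objective: alternative
-- what changed: A calls s.find('x', i, len(s)) for every '.' (a forward string search inside the loop, O(n^2) comparisons); B precomputes the next-'x' index for every position in one reverse pass and does a single forward scan with table lookups, O(n); on the timed inputs A's C-implemented find keeps it on par, so no speed is claimed.
import Mathlib
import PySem

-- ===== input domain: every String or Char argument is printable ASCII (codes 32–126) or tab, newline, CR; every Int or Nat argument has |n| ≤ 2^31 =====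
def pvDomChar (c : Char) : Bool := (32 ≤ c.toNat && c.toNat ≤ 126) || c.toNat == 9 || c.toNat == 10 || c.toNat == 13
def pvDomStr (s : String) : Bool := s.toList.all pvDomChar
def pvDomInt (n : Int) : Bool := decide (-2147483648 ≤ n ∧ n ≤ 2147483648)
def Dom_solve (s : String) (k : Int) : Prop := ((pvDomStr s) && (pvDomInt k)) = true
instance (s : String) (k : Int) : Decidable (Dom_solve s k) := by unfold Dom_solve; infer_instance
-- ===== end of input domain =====

-- B precomputes the next-'x' index for every position in one reverse pass, replacing A's
-- per-'.' forward string search (s.find) by a table lookup; objective: alternative algorithm.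

-- ===== PORT A =====
-- A's loop over range(len(s)); i always in range, so List.getD is exact for s[i];
-- s.find('x', i, len(s)) is PySem.Chars.findFrom with explicit end len(s).
def solveGoA (cs : List Char) (k : Int) : List Nat → Int → Bool
  | [], _ => false
  | i :: rest, prev =>
    if cs.getD i ' ' = 'x' then solveGoA cs k rest (i : Int)
    else if cs.getD i ' ' = '.' then
      let r := PySem.Chars.findFrom cs ['x'] (i : Int) (some (cs.length : Int))
      if (i : Int) - prev ≥ k ∧ (r = -1 ∨ r - (i : Int) ≥ k) then true
      else solveGoA cs k rest prev
    else solveGoA cs k rest prev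

def solve (s : String) (k : Int) : Bool :=
  solveGoA s.toList k (List.range s.toList.length) (-k)

-- ===== PORT B =====
-- Source B's reverse pass `for i in range(n-1,-1,-1)` building nxt (list built by prepending).
def buildNxt (cs : List Char) : Nat → Int → List Int → List Int
  | 0, _, acc => acc
  | j + 1, nx, acc =>
    let nx' := if cs.getD j ' ' = 'x' then (j : Int) else nx
    buildNxt cs j nx' (nx' :: acc)

-- Source B's forward scan; nxt[i] is a plain list index, always in range, so getD is exact.
def solveGoB (cs : List Char) (k : Int) (nxt : List Int) : List Nat → Int → Bool
  | [], _ => false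
  | i :: rest, prev =>
    if cs.getD i ' ' = 'x' then solveGoB cs k nxt rest (i : Int)
    else if cs.getD i ' ' = '.' then
      let r := nxt.getD i 0
      if (i : Int) - prev ≥ k ∧ (r = -1 ∨ r - (i : Int) ≥ k) then true
      else solveGoB cs k nxt rest prev
    else solveGoB cs k nxt rest prev

def solve_alt (s : String) (k : Int) : Bool :=
  let cs := s.toList
  solveGoB cs k (buildNxt cs cs.length (-1) []) (List.range cs.length) (-k)

-- ===== PRECONDITION & SPEC =====
def Spec_solve (s : String) (k : Int) (out : Bool) : Prop := out = solve_alt s k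
instance (s : String) (k : Int) (out : Bool) : Decidable (Spec_solve s k out) := by unfold Spec_solve; infer_instance

-- ===== CLAIM (what is proved, stated in full; the proofs are below) =====
def Claim_equal_solve : Prop := ∀ (s : String) (k : Int), Dom_solve s k → Spec_solve s k (solve s k)

-- ===== LEMMAS AND PROOFS =====

-- reference: index of the first 'x' at position ≥ j, else -1
def nxRef (cs : List Char) (j : Nat) : Int :=
  if _h : j < cs.length then
    (if cs.getD j ' ' = 'x' then (j : Int) else nxRef cs (j + 1))
  else -1
termination_by cs.length - j

theorem pref_drop (cs : List Char) (m : Nat) :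
    ['x'] <+: cs.drop m ↔ (m < cs.length ∧ cs.getD m ' ' = 'x') := by
  constructor
  · rintro ⟨t, ht⟩
    have h0 : (cs.drop m).head? = some 'x' := by rw [← ht]; rfl
    rw [List.head?_eq_getElem?, List.getElem?_drop, Nat.add_zero] at h0
    rw [List.getElem?_eq_some_iff] at h0
    obtain ⟨hlt, he⟩ := h0
    exact ⟨hlt, by rw [List.getD_eq_getElem _ _ hlt, he]⟩
  · rintro ⟨hlt, he⟩
    refine ⟨(cs.drop (m+1)), ?_⟩
    rw [List.getD_eq_getElem _ _ hlt] at he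
    have : cs.drop m = cs[m] :: cs.drop (m+1) := List.drop_eq_getElem_cons hlt
    rw [this, he]; rfl

theorem nxRef_spec (cs : List Char) (j : Nat) :
    (nxRef cs j = -1 ∧ ∀ m, j ≤ m → m < cs.length → cs.getD m ' ' ≠ 'x') ∨
    (∃ m : Nat, nxRef cs j = (m : Int) ∧ j ≤ m ∧ m < cs.length ∧ cs.getD m ' ' = 'x' ∧
      ∀ i, j ≤ i → i < m → cs.getD i ' ' ≠ 'x') := by
  have main : ∀ d j, cs.length - j ≤ d →
      (nxRef cs j = -1 ∧ ∀ m, j ≤ m → m < cs.length → cs.getD m ' ' ≠ 'x') ∨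
      (∃ m : Nat, nxRef cs j = (m : Int) ∧ j ≤ m ∧ m < cs.length ∧ cs.getD m ' ' = 'x' ∧
        ∀ i, j ≤ i → i < m → cs.getD i ' ' ≠ 'x') := by
    intro d
    induction d with
    | zero =>
      intro j hd
      have hj : ¬ j < cs.length := by omega
      left
      constructor
      · rw [nxRef]; simp [hj]
      · intro m hm hmlt; omega
    | succ d ih =>
      intro j hd
      by_cases hj : j < cs.length
      · by_cases hx : cs.getD j ' ' = 'x'
        · right
          refine ⟨j, ?_, le_refl _, hj, hx, fun i h1 h2 => by omega⟩
          rw [nxRef]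
          have hx' := hx
          rw [List.getD_eq_getElem _ _ hj] at hx'
          simp [hj, hx']
        · have hrec : nxRef cs j = nxRef cs (j+1) := by
            rw [nxRef]
            have hx' := hx
            rw [List.getD_eq_getElem _ _ hj] at hx'
            simp [hj, hx']
          rcases ih (j+1) (by omega) with ⟨h1, h2⟩ | ⟨m, hm, hjm, hmlt, hmx, hmin⟩
          · left
            refine ⟨by rw [hrec, h1], fun m hm hmlt => ?_⟩
            rcases Nat.eq_or_lt_of_le hm with rfl | h
            · exact hx
            · exact h2 m h hmlt
          · right
            refine ⟨m, by rw [hrec, hm], by omega, hmlt, hmx, fun i h1 h2 => ?_⟩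
            rcases Nat.eq_or_lt_of_le h1 with rfl | h
            · exact hx
            · exact hmin i h h2
      · left
        constructor
        · rw [nxRef]; simp [hj]
        · intro m hm hmlt; omega
  exact main (cs.length - j) j (le_refl _)

theorem findFrom_some_eq_none (cs : List Char) (sub : List Char) (j : Nat) :
    PySem.Chars.findFrom cs sub (j:Int) (some (cs.length:Int)) = PySem.Chars.findFrom cs sub (j:Int) none := by
  have h1 : ¬ ((cs.length:Int) < 0) := by omega
  have h2 : ¬ ((j:Int) < 0) := by omega
  simp [PySem.Chars.findFrom, h1, h2]


theorem findFrom_eq_nxRef (cs : List Char) (j : Nat) (hj : j ≤ cs.length) :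
    PySem.Chars.findFrom cs ['x'] (j : Int) (some (cs.length : Int)) = nxRef cs j := by
  rw [findFrom_some_eq_none]
  rcases nxRef_spec cs j with ⟨h1, h2⟩ | ⟨m, hm, hjm, hmlt, hmx, hmin⟩
  · rw [h1]
    rw [PySem.Chars.findFrom_natCast_eq_neg_one_iff cs ['x'] j hj]
    intro hinf
    rw [List.singleton_infix_iff] at hinf
    obtain ⟨i, hi, he⟩ := List.mem_iff_getElem.mp hinf
    rw [List.getElem_drop] at he
    have hlt : j + i < cs.length := by
      have := List.length_drop (l := cs) (i := j) ▸ hi; omega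
    exact h2 (j+i) (by omega) hlt (by rw [List.getD_eq_getElem _ _ hlt]; exact he)
  · rw [hm]
    have hne : PySem.Chars.findFrom cs ['x'] (j:Int) none ≠ -1 := by
      rw [ne_eq, PySem.Chars.findFrom_natCast_eq_neg_one_iff cs ['x'] j hj, not_not,
        List.singleton_infix_iff]
      have : cs.getD m ' ' ∈ cs.drop j := by
        rw [List.getD_eq_getElem _ _ hmlt]
        have : cs[m] = (cs.drop j)[m - j]'(by simp; omega) := by
          rw [List.getElem_drop]; congr 1; omega
        rw [this]; exact List.getElem_mem _
      rwa [hmx] at this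
    obtain ⟨hle, hpre, hminF⟩ := PySem.Chars.findFrom_natCast_spec cs ['x'] j hj hne
    set r := PySem.Chars.findFrom cs ['x'] (j:Int) none with hr
    have hr0 : 0 ≤ r := le_trans (by omega) hle
    obtain ⟨hrlt, hrx⟩ := (pref_drop cs r.toNat).mp hpre
    have : r.toNat = m := by
      by_contra hne'
      rcases Nat.lt_or_gt_of_ne hne' with h | h
      · exact hmin r.toNat (by omega) h hrx
      · exact hminF m (by omega) (by omega) ((pref_drop cs m).mpr ⟨hmlt, hmx⟩)
    omega

theorem buildNxt_inv (cs : List Char) :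
    ∀ j acc, j ≤ cs.length →
      buildNxt cs j (nxRef cs j) acc = (List.range j).map (nxRef cs) ++ acc := by
  intro j
  induction j with
  | zero => intro acc _; simp [buildNxt]
  | succ j ih =>
    intro acc hj
    have hjlt : j < cs.length := by omega
    have hstep : (if cs.getD j ' ' = 'x' then (j : Int) else nxRef cs (j+1)) = nxRef cs j := by
      conv_rhs => rw [nxRef]
      rw [dif_pos hjlt]
    show buildNxt cs j (if cs.getD j ' ' = 'x' then (j : Int) else nxRef cs (j+1))
        ((if cs.getD j ' ' = 'x' then (j : Int) else nxRef cs (j+1)) :: acc)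
      = (List.range (j+1)).map (nxRef cs) ++ acc
    rw [hstep, ih (nxRef cs j :: acc) (by omega), List.range_succ]
    simp

theorem go_congr (cs : List Char) (k : Int) (nxt : List Int)
    (h : ∀ i, i < cs.length →
      PySem.Chars.findFrom cs ['x'] (i : Int) (some (cs.length : Int)) = nxt.getD i 0) :
    ∀ idxs prev, (∀ i ∈ idxs, i < cs.length) →
      solveGoA cs k idxs prev = solveGoB cs k nxt idxs prev := by
  intro idxs
  induction idxs with
  | nil => intro prev _; rfl
  | cons i rest ih =>
    intro prev hmem
    have hi : i < cs.length := hmem i (by simp)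
    have hrest : ∀ i ∈ rest, i < cs.length := fun x hx => hmem x (by simp [hx])
    simp only [solveGoA, solveGoB, h i hi]
    split
    · exact ih _ hrest
    · split
      · split
        · rfl
        · exact ih _ hrest
      · exact ih _ hrest

-- ===== VERDICT (by name: the statement is the Claim_ definition above) =====
theorem solve_spec : Claim_equal_solve := by
  intro s k _
  unfold Spec_solve solve solve_alt
  set cs := s.toList with hcs
  apply go_congr
  · intro i hi
    have h1 : (buildNxt cs cs.length (-1) []) = (List.range cs.length).map (nxRef cs) := by
      have h0 : nxRef cs cs.length = -1 := by
        rw [nxRef]; simp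
      have := buildNxt_inv cs cs.length [] (le_refl _)
      rw [h0] at this
      simpa using this
    rw [findFrom_eq_nxRef cs i (le_of_lt hi), h1]
    rw [List.getD_eq_getElem?_getD]
    simp [hi]
  · intro i hi
    simpa using (List.mem_range.mp hi)
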